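-- pv_equiv track=rewrite | github.com/jiuhonglaugh/aoam | bin/hive.py | getHiveMetaStore
-- ===== SOURCE A (Python) =====
-- def getHiveMetaStore(keys, dicts):
--     for key in keys:
--         key = key.split(':')[0]
--         if key in dicts:
--             dicts[key] = dicts[key] + ',org.apache.hadoop.hive.metastore.HiveMetaStore'
--         else:
--             dicts[key] = 'org.apache.hadoop.hive.metastore.HiveMetaStore'
--     return dicts
-- ===== SOURCE B (Python) =====
-- def getHiveMetaStore(keys, dicts):
--     const = 'org.apache.hadoop.hive.metastore.HiveMetaStore'
--     counts = {}
--     for key in keys: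
--         p = key.split(':')[0]
--         counts[p] = counts.get(p, 0) + 1
--     for p, n in counts.items():
--         block = ','.join([const] * n)
--         if p in dicts:
--             dicts[p] = dicts[p] + ',' + block
--         else:
--             dicts[p] = block
--     return dicts
-- ===== Notes on version B (the rewrite author's own statement) =====
-- stated objective: faster
-- what changed: B first aggregates occurrence counts per prefix into a dict in one pass, then writes each dict entry exactly once using ','.join of the replicated constant, instead of A's per-occurrence incremental string append.
import Mathlib
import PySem

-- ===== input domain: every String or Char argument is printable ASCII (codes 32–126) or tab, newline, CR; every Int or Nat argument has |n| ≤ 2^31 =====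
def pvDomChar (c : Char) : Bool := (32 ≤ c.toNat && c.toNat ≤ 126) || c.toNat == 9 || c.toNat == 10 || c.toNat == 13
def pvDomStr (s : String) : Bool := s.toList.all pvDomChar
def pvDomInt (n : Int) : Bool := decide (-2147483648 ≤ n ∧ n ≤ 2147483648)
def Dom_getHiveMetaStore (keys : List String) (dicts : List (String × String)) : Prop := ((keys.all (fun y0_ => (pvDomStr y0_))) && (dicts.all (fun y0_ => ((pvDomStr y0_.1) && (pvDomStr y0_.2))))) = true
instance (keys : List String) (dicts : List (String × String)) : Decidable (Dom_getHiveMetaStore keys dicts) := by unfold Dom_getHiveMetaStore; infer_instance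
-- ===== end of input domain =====

-- B aggregates per-prefix occurrence counts first, then writes each dict entry once with a join, instead of A's per-key incremental string appends; return value proved equal (both Pythons mutate `dicts` in place the same way).


-- the metastore class constant both Pythons use
def pvHMS : String := "org.apache.hadoop.hive.metastore.HiveMetaStore"

-- key.split(':')[0]; ':' is a nonempty separator so split? is `some` and the result is
-- never empty, hence the two getD defaults are never taken (exact port of split(':')[0])
def pvPrefix (key : String) : String := ((PySem.Str.split? key ":").getD []).getD 0 ""

-- ===== PORT A =====
def getHiveMetaStore (keys : List String) (dicts : List (String × String)) : List (String × String) :=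
  (keys.foldl (fun (d : PySem.Dict String String) key =>
      let k := pvPrefix key
      if d.contains k then
        d.insert k (d.getD k "" ++ ",org.apache.hadoop.hive.metastore.HiveMetaStore")
      else
        d.insert k pvHMS) ⟨dicts⟩).items

-- ===== PORT B =====
def getHiveMetaStore_alt (keys : List String) (dicts : List (String × String)) : List (String × String) :=
  let counts := keys.foldl (fun (c : PySem.Dict String Int) key =>
      let p := pvPrefix key
      c.insert p (c.getD p 0 + 1)) PySem.Dict.empty
  (counts.items.foldl (fun (d : PySem.Dict String String) pn =>
      let block := PySem.Str.join "," (PySem.List.pyRepeat [pvHMS] pn.2)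
      if d.contains pn.1 then
        d.insert pn.1 (d.getD pn.1 "" ++ "," ++ block)
      else
        d.insert pn.1 block) ⟨dicts⟩).items

-- ===== PRECONDITION & SPEC =====
def Spec_getHiveMetaStore (keys : List String) (dicts : List (String × String)) (out : List (String × String)) : Prop := out = getHiveMetaStore_alt keys dicts
instance (keys : List String) (dicts : List (String × String)) (out : List (String × String)) : Decidable (Spec_getHiveMetaStore keys dicts out) := by unfold Spec_getHiveMetaStore; infer_instance

-- ===== CLAIM (what is proved, stated in full; the proofs are below) =====
def Claim_equal_getHiveMetaStore : Prop := ∀ (keys : List String) (dicts : List (String × String)), Dom_getHiveMetaStore keys dicts → Spec_getHiveMetaStore keys dicts (getHiveMetaStore keys dicts)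

-- ===== LEMMAS AND PROOFS =====

-- A's loop body, on an already-extracted prefix
def bumpD (d : PySem.Dict String String) (p : String) : PySem.Dict String String :=
  if d.contains p then
    d.insert p (d.getD p "" ++ ",org.apache.hadoop.hive.metastore.HiveMetaStore")
  else
    d.insert p pvHMS

-- B's second-loop body
def stepD (d : PySem.Dict String String) (pn : String × Int) : PySem.Dict String String :=
  let block := PySem.Str.join "," (PySem.List.pyRepeat [pvHMS] pn.2)
  if d.contains pn.1 then
    d.insert pn.1 (d.getD pn.1 "" ++ "," ++ block)
  else
    d.insert pn.1 block

theorem inter_cons_cons (s a b : List Char) (l : List (List Char)) :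
    List.intercalate s (a :: b :: l) = a ++ s ++ List.intercalate s (b :: l) := by
  simp [List.intercalate, List.intersperse]

theorem inter_rep_closed (s c : List Char) (m : Nat) :
    List.intercalate s (List.replicate (m+1) c) = c ++ (List.replicate m (s ++ c)).flatten := by
  induction m with
  | zero => simp [List.intercalate]
  | succ k ih =>
    rw [List.replicate_succ (n := k+1), List.replicate_succ (n := k), inter_cons_cons,
      ← List.replicate_succ (n := k), ih]
    simp [List.replicate_succ]

theorem join_succ (m : Nat) (h : 1 ≤ m) :
    PySem.Str.join "," (List.replicate (m+1) pvHMS)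
      = PySem.Str.join "," (List.replicate m pvHMS) ++ "," ++ pvHMS := by
  obtain ⟨k, rfl⟩ : ∃ k, m = k + 1 := ⟨m - 1, by omega⟩
  simp only [PySem.Str.join, PySem.Chars.join, List.map_replicate]
  rw [inter_rep_closed, inter_rep_closed]
  conv_rhs => rw [show pvHMS = String.ofList pvHMS.toList from (String.ofList_toList (s := pvHMS)).symm]
  rw [← String.ofList_append, ← String.ofList_append]
  congr 1
  simp [List.replicate_succ' (n := k)]

theorem commaHMS : ",org.apache.hadoop.hive.metastore.HiveMetaStore" = "," ++ pvHMS := by decide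

-- two inserts at distinct keys commute when the first key is already present (it overwrites in place)
theorem insert_comm_of_contains (d : PySem.Dict String String) (p q : String) (v w : String)
    (hpq : q ≠ p) (hp : d.contains p = true) :
    (d.insert p v).insert q w = (d.insert q w).insert p v := by
  apply PySem.Dict.ext
  have hqp : p ≠ q := fun h => hpq h.symm
  by_cases hq : d.contains q = true
  · have c1 : (d.insert p v).contains q = true := by
      rw [PySem.Dict.contains_insert]; simp [hq]
    have c2 : (d.insert q w).contains p = true := by
      rw [PySem.Dict.contains_insert]; simp [hp]
    rw [PySem.Dict.items_insert_of_contains _ w c1, PySem.Dict.items_insert_of_contains _ v hp,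
      PySem.Dict.items_insert_of_contains _ v c2, PySem.Dict.items_insert_of_contains _ w hq,
      List.map_map, List.map_map]
    apply List.map_congr_left
    intro x _
    simp only [Function.comp]
    by_cases hxp : x.1 = p
    · simp [hxp, hqp]
    · by_cases hxq : x.1 = q <;> simp [hxp, hxq, hpq]
  · have hq' : d.contains q = false := by simpa using hq
    have c1 : (d.insert p v).contains q = false := by
      rw [PySem.Dict.contains_insert]; simp [hpq, hq']
    have c2 : (d.insert q w).contains p = true := by
      rw [PySem.Dict.contains_insert]; simp [hp]
    rw [PySem.Dict.items_insert_of_not_contains _ w c1, PySem.Dict.items_insert_of_contains _ v hp,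
      PySem.Dict.items_insert_of_contains _ v c2, PySem.Dict.items_insert_of_not_contains _ w hq',
      List.map_append]
    simp [hpq]

-- stepD at key q commutes past bumpD at an already-present key p ≠ q
theorem bump_step_comm (d : PySem.Dict String String) (p q : String) (m : Int)
    (hpq : q ≠ p) (hp : d.contains p = true) :
    stepD (bumpD d p) (q, m) = bumpD (stepD d (q, m)) p := by
  have hqp : p ≠ q := fun h => hpq h.symm
  by_cases hq : d.contains q = true
  · have l1 : stepD (bumpD d p) (q, m) =
        (d.insert p (d.getD p "" ++ ",org.apache.hadoop.hive.metastore.HiveMetaStore")).insert q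
          (d.getD q "" ++ "," ++ PySem.Str.join "," (PySem.List.pyRepeat [pvHMS] m)) := by
      unfold bumpD stepD
      simp [hp, PySem.Dict.contains_insert, hq, PySem.Dict.getD_insert_of_ne _ _ _ hpq]
    have l2 : bumpD (stepD d (q, m)) p =
        (d.insert q (d.getD q "" ++ "," ++ PySem.Str.join "," (PySem.List.pyRepeat [pvHMS] m))).insert p
          (d.getD p "" ++ ",org.apache.hadoop.hive.metastore.HiveMetaStore") := by
      unfold bumpD stepD
      simp [hq, PySem.Dict.contains_insert, hp, PySem.Dict.getD_insert_of_ne _ _ _ hqp]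
    rw [l1, l2]
    exact insert_comm_of_contains d p q _ _ hpq hp
  · have hq' : d.contains q = false := by simpa using hq
    have l1 : stepD (bumpD d p) (q, m) =
        (d.insert p (d.getD p "" ++ ",org.apache.hadoop.hive.metastore.HiveMetaStore")).insert q
          (PySem.Str.join "," (PySem.List.pyRepeat [pvHMS] m)) := by
      unfold bumpD stepD
      simp [hp, PySem.Dict.contains_insert, hq', hpq]
    have l2 : bumpD (stepD d (q, m)) p =
        (d.insert q (PySem.Str.join "," (PySem.List.pyRepeat [pvHMS] m))).insert p
          (d.getD p "" ++ ",org.apache.hadoop.hive.metastore.HiveMetaStore") := by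
      unfold bumpD stepD
      simp [hq', PySem.Dict.contains_insert, hp, PySem.Dict.getD_insert_of_ne _ _ _ hqp]
    rw [l1, l2]
    exact insert_comm_of_contains d p q _ _ hpq hp

-- a whole fold of stepD over pairs whose keys avoid p commutes past bumpD at p
theorem fold_bump_comm (L : List (String × Int)) (d : PySem.Dict String String) (p : String)
    (hL : ∀ x ∈ L, x.1 ≠ p) (hp : d.contains p = true) :
    L.foldl stepD (bumpD d p) = bumpD (L.foldl stepD d) p := by
  induction L generalizing d with
  | nil => rfl
  | cons x L ih =>
    have hx : x.1 ≠ p := hL x (by simp)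
    have hstep : (stepD d x).contains p = true := by
      unfold stepD
      by_cases hc : d.contains x.1 = true <;>
        simp [hc, PySem.Dict.contains_insert, hp]
    simp only [List.foldl_cons]
    rw [show stepD (bumpD d p) x = bumpD (stepD d x) p from by
      rcases x with ⟨q, mm⟩; exact bump_step_comm d p q mm hx hp]
    exact ih (stepD d x) (fun y hy => hL y (List.mem_cons_of_mem _ hy)) hstep

-- stepD with count 1 is exactly one bumpD
theorem step_one (d : PySem.Dict String String) (p : String) :
    stepD d (p, 1) = bumpD d p := by
  unfold stepD bumpD
  have hb : PySem.Str.join "," (PySem.List.pyRepeat [pvHMS] 1) = pvHMS := by decide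
  rw [hb]
  by_cases hp : d.contains p = true
  · simp only [hp, if_true]
    rw [commaHMS, ← String.append_assoc]
  · simp [hp]

-- stepD with count m+1 is stepD with count m followed by one bumpD (m ≥ 1)
theorem step_succ (d : PySem.Dict String String) (p : String) (m : Int) (hm : 1 ≤ m) :
    stepD d (p, m + 1) = bumpD (stepD d (p, m)) p := by
  obtain ⟨k, rfl⟩ : ∃ k : Nat, m = (k : Int) := ⟨m.toNat, (Int.toNat_of_nonneg (by omega)).symm⟩
  have hk : 1 ≤ k := by exact_mod_cast hm
  unfold stepD bumpD
  simp only [PySem.List.pyRepeat_singleton]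
  have h1 : ((k : Int) + 1).toNat = k + 1 := by omega
  have h2 : ((k : Int)).toNat = k := by omega
  rw [h1, h2, join_succ k hk]
  by_cases hp : d.contains p = true
  · simp only [hp, if_true, PySem.Dict.contains_insert_self, PySem.Dict.getD_insert_self,
      PySem.Dict.insert_insert_self]
    rw [commaHMS]
    simp [String.append_assoc]
  · simp only [hp, Bool.false_eq_true, if_false, PySem.Dict.contains_insert_self, if_true,
      PySem.Dict.getD_insert_self, PySem.Dict.insert_insert_self]
    rw [commaHMS]
    simp [String.append_assoc]

-- stepD at key p always leaves p present
theorem contains_stepD_self (d : PySem.Dict String String) (p : String) (m : Int) :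
    (stepD d (p, m)).contains p = true := by
  unfold stepD
  by_cases hc : d.contains p = true <;> simp [hc, PySem.Dict.contains_insert_self]

-- main invariant: A's incremental fold over the prefixes equals B's grouped fold over (prefix, count) pairs
theorem main_fold (ps : List String) (d : PySem.Dict String String) :
    ps.foldl bumpD d
      = ((PySem.Set.ofList ps).map (fun q => (q, (List.count q ps : Int)))).foldl stepD d := by
  induction ps using List.reverseRecOn generalizing d with
  | nil => simp [pysem]
  | append_singleton ps p ih =>
    rw [List.foldl_append, List.foldl_cons, List.foldl_nil, ih]
    by_cases hp : p ∈ ps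
    · have hset : PySem.Set.ofList (ps ++ [p]) = PySem.Set.ofList ps := by simp [pysem, hp]
      obtain ⟨L1, L2, hsplit⟩ := List.append_of_mem ((PySem.Set.mem_ofList ps p).mpr hp)
      have hnd := PySem.Set.nodup_ofList ps
      rw [hsplit] at hnd
      have hp1 : p ∉ L1 := fun h =>
        (List.disjoint_of_nodup_append hnd) h (List.mem_cons_self ..)
      have hp2 : p ∉ L2 := by
        have h2 : (p :: L2).Nodup := hnd.of_append_right
        exact (List.nodup_cons.mp h2).1
      have hn1 : 1 ≤ List.count p ps := List.count_pos_iff.mpr hp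
      have hcount : (List.count p (ps ++ [p]) : Int) = (List.count p ps : Int) + 1 := by
        simp [List.count_append]
      have hmapL1 : L1.map (fun q => (q, (List.count q (ps ++ [p]) : Int)))
          = L1.map (fun q => (q, (List.count q ps : Int))) := by
        apply List.map_congr_left
        intro q hq
        have hqp : q ≠ p := fun h => hp1 (h ▸ hq)
        simp [List.count_append, Ne.symm hqp]
      have hmapL2 : L2.map (fun q => (q, (List.count q (ps ++ [p]) : Int)))
          = L2.map (fun q => (q, (List.count q ps : Int))) := by
        apply List.map_congr_left
        intro q hq
        have hqp : q ≠ p := fun h => hp2 (h ▸ hq)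
        simp [List.count_append, Ne.symm hqp]
      rw [hset, hsplit, List.map_append, List.map_cons, List.map_append, List.map_cons,
        hmapL1, hmapL2, hcount, List.foldl_append, List.foldl_append, List.foldl_cons,
        List.foldl_cons,
        step_succ _ _ _ (by exact_mod_cast hn1),
        fold_bump_comm _ _ _
          (by
            intro x hx
            obtain ⟨q, hq, rfl⟩ := List.mem_map.mp hx
            exact fun h => hp2 (h ▸ hq))
          (contains_stepD_self _ _ _)]
    · have hset : PySem.Set.ofList (ps ++ [p]) = PySem.Set.ofList ps ++ [p] := by simp [pysem, hp]
      have hmap : (PySem.Set.ofList ps).map (fun q => (q, (List.count q (ps ++ [p]) : Int)))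
          = (PySem.Set.ofList ps).map (fun q => (q, (List.count q ps : Int))) := by
        apply List.map_congr_left
        intro q hq
        have hqp : q ≠ p := fun h => hp (h ▸ (PySem.Set.mem_ofList ps q).mp hq)
        simp [List.count_append, Ne.symm hqp]
      have hone : (List.count p (ps ++ [p]) : Int) = 1 := by
        simp [List.count_append, List.count_eq_zero.mpr hp]
      rw [hset, List.map_append, List.map_cons, List.map_nil, hmap, hone, List.foldl_append,
        List.foldl_cons, List.foldl_nil, step_one]

-- ===== VERDICT (by name: the statement is the Claim_ definition above) =====
theorem getHiveMetaStore_spec : Claim_equal_getHiveMetaStore := by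
  intro keys dicts _
  unfold Spec_getHiveMetaStore getHiveMetaStore getHiveMetaStore_alt
  show (List.foldl (fun d key => bumpD d (pvPrefix key)) ⟨dicts⟩ keys).items
      = ((List.foldl (fun c key =>
            PySem.Dict.insert c (pvPrefix key) (c.getD (pvPrefix key) 0 + 1))
          PySem.Dict.empty keys).items.foldl stepD ⟨dicts⟩).items
  rw [← List.foldl_map (f := pvPrefix) (g := bumpD),
    ← List.foldl_map (f := pvPrefix)
      (g := fun (c : PySem.Dict String Int) p => c.insert p (c.getD p 0 + 1)),
    PySem.Dict.foldl_insert_getD_add_one_eq_counter, PySem.Dict.items_counter, main_fold]
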